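-- pv_equiv track=rewrite | github.com/c0deaddict/advent-of-code | 2019/python/day_18.py | path_dist_part2
-- ===== SOURCE A (Python) =====
-- def path_dist_part2(graphs, path):
--     dist = 0
--     bots = list(path[0][0])
--     for next in path[1:]:
--         for i, (v, u) in enumerate(zip(bots, next[0])):
--             if u != v:
--                 bots[i] = u
--                 dist += graphs[i][v][u]
--     return dist
-- ===== SOURCE B (Python) =====
-- def path_dist_part2(graphs, path):
--     total = 0
--     for i, start in enumerate(path[0][0]):
--         seq = [start] + [p[0][i] for p in path[1:] if len(p[0]) > i]
--         total += sum(graphs[i][v][u] for v, u in zip(seq, seq[1:]) if u != v)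
--     return total
-- ===== Notes on version B (the rewrite author's own statement) =====
-- stated objective: simpler
-- what changed: B drops A's step-wise fold over a mutable bots list and instead traverses column-wise: for each robot index i it extracts that robot's position sequence along the path and sums graphs[i][v][u] over consecutive distinct values, so no cross-step mutable state is kept.
import Mathlib
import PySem

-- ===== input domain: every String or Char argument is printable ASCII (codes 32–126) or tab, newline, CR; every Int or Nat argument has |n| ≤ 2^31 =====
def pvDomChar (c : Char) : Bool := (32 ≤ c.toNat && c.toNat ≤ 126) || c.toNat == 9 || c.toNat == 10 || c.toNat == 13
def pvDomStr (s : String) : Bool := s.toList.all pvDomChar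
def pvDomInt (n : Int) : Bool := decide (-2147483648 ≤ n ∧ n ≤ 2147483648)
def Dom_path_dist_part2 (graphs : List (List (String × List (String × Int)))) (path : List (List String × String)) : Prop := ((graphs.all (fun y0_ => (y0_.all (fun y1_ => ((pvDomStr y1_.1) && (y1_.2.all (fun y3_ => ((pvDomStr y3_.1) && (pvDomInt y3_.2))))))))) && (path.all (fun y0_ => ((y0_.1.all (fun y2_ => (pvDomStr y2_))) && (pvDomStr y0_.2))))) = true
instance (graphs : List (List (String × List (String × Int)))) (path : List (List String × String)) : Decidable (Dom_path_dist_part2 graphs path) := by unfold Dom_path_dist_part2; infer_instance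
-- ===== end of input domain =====

-- B replaces A's step-wise fold over a mutable `bots` list by a stateless column-wise (per-robot) sum (objective: simpler).

-- shared lookup helper: graphs[i][v][u], total form (defaults are never reached inside Pre_)
def pvLook (graphs : List (List (String × List (String × Int)))) (i : Int) (v u : String) : Int :=
  PySem.Dict.getD (PySem.Dict.mk (PySem.Dict.getD (PySem.Dict.mk (PySem.List.pyGetD graphs i [])) v [])) u 0

-- graphs[i][v][u], none = IndexError/KeyError (used only by Pre_)
def pvLook? (graphs : List (List (String × List (String × Int)))) (i : Int) (v u : String) : Option Int :=
  (PySem.List.pyGet? graphs i).bind (fun g =>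
    (PySem.Dict.get? (PySem.Dict.mk g) v).bind (fun d =>
      PySem.Dict.get? (PySem.Dict.mk d) u))

-- column i of the path tail: [p[0][i] for p in rest if len(p[0]) > i]  (used by port B and by Pre_)
def pvColVals (i : Int) (rest : List (List String × String)) : List String :=
  rest.filterMap (fun p => PySem.List.pyGet? p.1 i)

-- ===== PORT A =====
-- inner loop body: for i, (v, u) in enumerate(zip(bots, next[0])): if u != v: bots[i] = u; dist += graphs[i][v][u]
def pvInner (graphs : List (List (String × List (String × Int)))) (acc : Int × List String) (ivu : Int × String × String) : Int × List String :=
  if ivu.2.2 ≠ ivu.2.1 then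
    (acc.1 + pvLook graphs ivu.1 ivu.2.1 ivu.2.2, PySem.List.pySetD acc.2 ivu.1 ivu.2.2)
  else acc

-- outer loop body: one iteration of 'for next in path[1:]'
def pvStep (graphs : List (List (String × List (String × Int)))) (acc : Int × List String) (nxt : List String × String) : Int × List String :=
  (PySem.List.enumerate (List.zip acc.2 nxt.1)).foldl (pvInner graphs) acc

def path_dist_part2 (graphs : List (List (String × List (String × Int)))) (path : List (List String × String)) : Int :=
  -- bots = list(path[0][0]); path[0] raises IndexError on an empty path, excluded by Pre_
  let bots : List String := ((PySem.List.pyGet? path 0).getD ([], "")).1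
  ((PySem.List.slice path (some 1) none).foldl (pvStep graphs) ((0 : Int), bots)).1

-- ===== PORT B =====
def path_dist_part2_alt (graphs : List (List (String × List (String × Int)))) (path : List (List String × String)) : Int :=
  -- for i, start in enumerate(path[0][0]): …  (path[0] raises IndexError on an empty path, excluded by Pre_)
  let start0 : List String := ((PySem.List.pyGet? path 0).getD ([], "")).1
  (PySem.List.enumerate start0).foldl
    (fun total ist =>
      -- seq = [start] + [p[0][i] for p in path[1:] if len(p[0]) > i]
      let seq : List String :=
        ist.2 :: (PySem.List.slice path (some 1) none).filterMap (fun p => PySem.List.pyGet? p.1 ist.1)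
      -- total += sum(graphs[i][v][u] for v, u in zip(seq, seq[1:]) if u != v)
      total +
        ((List.zip seq seq.tail).filterMap (fun vu =>
          if vu.2 ≠ vu.1 then some (pvLook graphs ist.1 vu.1 vu.2) else none)).sum)
    0

-- ===== PRECONDITION & SPEC =====
-- Pre_ excludes exactly the inputs where A raises: the empty path (path[0] is an IndexError) and
-- paths making some move whose graphs[i][v][u] lookup is missing (IndexError/KeyError).
def Pre_path_dist_part2 (graphs : List (List (String × List (String × Int)))) (path : List (List String × String)) : Prop :=
  path ≠ [] ∧
  (∀ iv ∈ PySem.List.enumerate ((path.headD ([], "")).1),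
    ∀ vu ∈ (List.zip (iv.2 :: pvColVals iv.1 path.tail) (pvColVals iv.1 path.tail)),
      vu.2 ≠ vu.1 → (pvLook? graphs iv.1 vu.1 vu.2).isSome)
instance (graphs : List (List (String × List (String × Int)))) (path : List (List String × String)) : Decidable (Pre_path_dist_part2 graphs path) := by unfold Pre_path_dist_part2; infer_instance

def pvWitness_path_dist_part2 : (List (List (String × List (String × Int)))) × (List (List String × String)) :=
  ([[("a", [("b", (3 : Int))])]], [(["a"], ""), (["b"], "")])

def Spec_path_dist_part2 (graphs : List (List (String × List (String × Int)))) (path : List (List String × String)) (out : Int) : Prop := out = path_dist_part2_alt graphs path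
instance (graphs : List (List (String × List (String × Int)))) (path : List (List String × String)) (out : Int) : Decidable (Spec_path_dist_part2 graphs path out) := by unfold Spec_path_dist_part2; infer_instance

-- ===== CLAIM (what is proved, stated in full; the proofs are below) =====
def Claim_equal_path_dist_part2 : Prop := ∀ (graphs : List (List (String × List (String × Int)))) (path : List (List String × String)), Dom_path_dist_part2 graphs path → Pre_path_dist_part2 graphs path → Spec_path_dist_part2 graphs path (path_dist_part2 graphs path)

-- ===== LEMMAS AND PROOFS =====

-- A's contribution of one column: fold of the chain v → u₁ → u₂ → … (bots[i] always holds the previous value)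
def pvChain (graphs : List (List (String × List (String × Int)))) (i : Int) : String → List String → Int
  | _, [] => 0
  | v, u :: us => (if u ≠ v then pvLook graphs i v u else 0) + pvChain graphs i u us

-- the final bots list of one inner loop: zipped positions are overwritten, the rest kept
def pvOw : List String → List String → List String
  | vs, [] => vs
  | [], _ => []
  | _ :: vs, u :: us => u :: pvOw vs us

-- column-wise value of A's fold from an arbitrary bots list
def pvCols (graphs : List (List (String × List (String × Int)))) (rest : List (List String × String)) (b : List String) (s : Int) : Int :=
  ((PySem.List.enumerate b s).map (fun iv => pvChain graphs iv.1 iv.2 (pvColVals iv.1 rest))).sum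

lemma pv_foldl_add {α : Type} (f : α → Int) : ∀ (l : List α) (a : Int),
    l.foldl (fun t x => t + f x) a = a + (l.map f).sum := by
  intro l
  induction l with
  | nil => intro a; simp
  | cons x l ih => intro a; simp [ih]; ring

lemma pv_chain_eq_sum (graphs : List (List (String × List (String × Int)))) (i : Int) :
    ∀ (l : List String) (v : String),
    ((List.zip (v :: l) l).filterMap (fun vu =>
      if vu.2 ≠ vu.1 then some (pvLook graphs i vu.1 vu.2) else none)).sum = pvChain graphs i v l := by
  intro l
  induction l with
  | nil => intro v; simp [pvChain]
  | cons u us ih =>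
    intro v
    rw [List.zip_cons_cons, List.filterMap_cons]
    by_cases h : u = v
    · subst h; simpa [pvChain] using ih u
    · simp [pvChain, h]
      simpa using ih u

lemma pv_inner_fold (graphs : List (List (String × List (String × Int)))) :
    ∀ (vs us pre : List String) (d : Int),
    (PySem.List.enumerate (List.zip vs us) (pre.length : Int)).foldl (pvInner graphs) (d, pre ++ vs) =
      (d + ((PySem.List.enumerate (List.zip vs us) (pre.length : Int)).filterMap (fun ivu =>
         if ivu.2.2 ≠ ivu.2.1 then some (pvLook graphs ivu.1 ivu.2.1 ivu.2.2) else none)).sum,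
       pre ++ pvOw vs us) := by
  intro vs
  induction vs with
  | nil => intro us pre d; cases us <;> simp [pvOw]
  | cons v vs ih =>
    intro us pre d
    cases us with
    | nil => simp [pvOw]
    | cons u us =>
      rw [List.zip_cons_cons, PySem.List.enumerate_cons]
      by_cases huv : u = v
      · subst huv
        have h1 : pvInner graphs (d, pre ++ u :: vs) ((pre.length : Int), (u, u)) = (d, pre ++ u :: vs) := by
          simp [pvInner]
        rw [List.foldl_cons, h1]
        have hpre : pre ++ u :: vs = (pre ++ [u]) ++ vs := by simp
        have hlen : ((pre.length : Int) + 1) = ((pre ++ [u]).length : Int) := by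
          simp
        rw [hpre, hlen, ih us (pre ++ [u]) d]
        simp [pvOw]
      · have h1 : pvInner graphs (d, pre ++ v :: vs) ((pre.length : Int), (v, u)) =
            (d + pvLook graphs (pre.length : Int) v u, pre ++ u :: vs) := by
          simp only [pvInner, ne_eq, huv, not_false_eq_true, if_true]
          congr 1
          rw [show ((pre.length : Int)) = ((pre.length : Nat) : Int) from rfl, PySem.List.pySetD_natCast]
          rw [List.set_append]
          simp
        rw [List.foldl_cons, h1]
        have hpre : pre ++ u :: vs = (pre ++ [u]) ++ vs := by simp
        have hlen : ((pre.length : Int) + 1) = ((pre ++ [u]).length : Int) := by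
          simp
        rw [hpre, hlen, ih us (pre ++ [u]) (d + pvLook graphs (pre.length : Int) v u)]
        simp [pvOw, huv]
        ring

lemma pv_cols_cons (graphs : List (List (String × List (String × Int)))) (rest : List (List String × String))
    (v : String) (b : List String) (s : Int) :
    pvCols graphs rest (v :: b) s = pvChain graphs s v (pvColVals s rest) + pvCols graphs rest b (s + 1) := by
  simp [pvCols, PySem.List.enumerate_cons]

-- a step whose tuple covers none of the indices s, s+1, … contributes nothing to any of those columns
lemma pv_cols_skip (graphs : List (List (String × List (String × Int)))) (rest : List (List String × String))
    (nxtl : List String) (str : String) :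
    ∀ (b : List String) (s : Int), (∀ k : Nat, PySem.List.pyGet? nxtl (s + (k : Int)) = none) →
    pvCols graphs ((nxtl, str) :: rest) b s = pvCols graphs rest b s := by
  intro b
  induction b with
  | nil => intro s _; simp [pvCols]
  | cons v b ih =>
    intro s h0
    have hs : PySem.List.pyGet? nxtl s = none := by
      have := h0 0; simpa using this
    have hcol : pvColVals s ((nxtl, str) :: rest) = pvColVals s rest := by
      simp [pvColVals, hs]
    have htail := ih (s + 1) (fun k => by
      have h := h0 (k + 1)
      have : s + 1 + (k : Int) = s + ((k : Nat) + 1 : Nat) := by push_cast; ring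
      rw [this]; exact h)
    rw [pv_cols_cons, pv_cols_cons, hcol, htail]

-- one step of A's outer loop, seen column-wise
lemma pv_cols_step (graphs : List (List (String × List (String × Int)))) (rest : List (List String × String))
    (nxtl : List String) (str : String) :
    ∀ (b us : List String) (s : Int), (∀ k : Nat, PySem.List.pyGet? nxtl (s + (k : Int)) = us[k]?) →
    ((PySem.List.enumerate (List.zip b us) s).filterMap (fun ivu =>
        if ivu.2.2 ≠ ivu.2.1 then some (pvLook graphs ivu.1 ivu.2.1 ivu.2.2) else none)).sum
      + pvCols graphs rest (pvOw b us) s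
    = pvCols graphs ((nxtl, str) :: rest) b s := by
  intro b
  induction b with
  | nil => intro us s _; cases us <;> simp [pvOw, pvCols]
  | cons v b ih =>
    intro us s hh
    cases us with
    | nil =>
      have h0 : ∀ k : Nat, PySem.List.pyGet? nxtl (s + (k : Int)) = none := by
        intro k; simpa using hh k
      rw [pv_cols_skip graphs rest nxtl str (v :: b) s h0]
      simp [pvOw]
    | cons u us =>
      have hs : PySem.List.pyGet? nxtl s = some u := by
        have := hh 0; simpa using this
      have hcol : pvColVals s ((nxtl, str) :: rest) = u :: pvColVals s rest := by
        simp [pvColVals, hs]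
      have hh' : ∀ k : Nat, PySem.List.pyGet? nxtl (s + 1 + (k : Int)) = us[k]? := by
        intro k
        have h := hh (k + 1)
        have heq : s + 1 + (k : Int) = s + ((k : Nat) + 1 : Nat) := by push_cast; ring
        rw [heq, h]; simp
      have hih := ih us (s + 1) hh'
      have how : pvOw (v :: b) (u :: us) = u :: pvOw b us := rfl
      rw [List.zip_cons_cons, PySem.List.enumerate_cons, List.filterMap_cons, how,
          pv_cols_cons graphs rest u (pvOw b us) s,
          pv_cols_cons graphs ((nxtl, str) :: rest) v b s, hcol]
      have hchain : pvChain graphs s v (u :: pvColVals s rest)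
          = (if u ≠ v then pvLook graphs s v u else 0) + pvChain graphs s u (pvColVals s rest) := rfl
      rw [hchain, ← hih]
      by_cases huv : u = v
      · subst huv; simp; ring
      · simp [huv]; ring

-- A's fold over an empty tail adds nothing in any column
lemma pv_cols_nil (graphs : List (List (String × List (String × Int)))) :
    ∀ (b : List String) (s : Int), pvCols graphs [] b s = 0 := by
  intro b
  induction b with
  | nil => intro s; simp [pvCols]
  | cons v b ih => intro s; rw [pv_cols_cons]; simp [pvColVals, pvChain, ih]

-- A's whole fold from an arbitrary bots list, column-wise
lemma pv_A_fold (graphs : List (List (String × List (String × Int)))) :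
    ∀ (rest : List (List String × String)) (b : List String) (d : Int),
    (rest.foldl (pvStep graphs) (d, b)).1 = d + pvCols graphs rest b 0 := by
  intro rest
  induction rest with
  | nil =>
    intro b d
    simp only [List.foldl_nil]
    rw [pv_cols_nil]
    ring
  | cons nxt rest ih =>
    intro b d
    have hstep : pvStep graphs (d, b) nxt =
        (d + ((PySem.List.enumerate (List.zip b nxt.1) 0).filterMap (fun ivu =>
          if ivu.2.2 ≠ ivu.2.1 then some (pvLook graphs ivu.1 ivu.2.1 ivu.2.2) else none)).sum,
         pvOw b nxt.1) := by
      have := pv_inner_fold graphs b nxt.1 [] d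
      simp only [List.length_nil, Nat.cast_zero, List.nil_append] at this
      rw [pvStep, this]
    rw [List.foldl_cons, hstep, ih]
    have hh : ∀ k : Nat, PySem.List.pyGet? nxt.1 ((0 : Int) + (k : Int)) = nxt.1[k]? := by
      intro k
      rw [zero_add]
      exact PySem.List.pyGet?_natCast nxt.1 k
    have := pv_cols_step graphs rest nxt.1 nxt.2 b nxt.1 0 hh
    rw [← this]
    ring

-- ===== VERDICT (by name: the statement is the Claim_ definition above) =====
theorem path_dist_part2_spec : Claim_equal_path_dist_part2 := by
  intro graphs path _ hpre
  obtain ⟨hne, -⟩ := hpre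
  cases path with
  | nil => exact absurd rfl hne
  | cons p0 rest =>
    show path_dist_part2 graphs (p0 :: rest) = path_dist_part2_alt graphs (p0 :: rest)
    have hbots : ((PySem.List.pyGet? (p0 :: rest) 0).getD ([], "")).1 = p0.1 := by
      simp [PySem.List.pyGet?, PySem.List.pyIdx?]
    have hslice : PySem.List.slice (p0 :: rest) (some 1) none = rest := by
      rw [show (1 : Int) = ((1 : Nat) : Int) from rfl, PySem.List.slice_from_natCast]
      simp
    rw [path_dist_part2, path_dist_part2_alt]
    simp only [hbots, hslice]
    rw [pv_A_fold graphs rest p0.1 0, zero_add]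
    rw [pv_foldl_add (fun ist : Int × String =>
      ((List.zip (ist.2 :: List.filterMap (fun p => PySem.List.pyGet? p.1 ist.1) rest)
          ((ist.2 :: List.filterMap (fun p => PySem.List.pyGet? p.1 ist.1) rest)).tail).filterMap (fun vu =>
        if vu.2 ≠ vu.1 then some (pvLook graphs ist.1 vu.1 vu.2) else none)).sum)]
    rw [zero_add, pvCols]
    congr 1
    apply List.map_congr_left
    intro iv _
    exact (pv_chain_eq_sum graphs iv.1 (pvColVals iv.1 rest) iv.2).symm
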